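-- pv_equiv track=rewrite | github.com/JessicaOI/LabE | YAPar.py | get_terminals_and_non_terminals
-- ===== SOURCE A (Python) =====
-- def get_terminals_and_non_terminals(productions):
--     non_terminals = set(productions.keys())
--     terminals = set()
--
--     for non_terminal in non_terminals:
--         for production in productions[non_terminal]:
--             for symbol in production:
--                 if symbol not in non_terminals:
--                     terminals.add(symbol)
--
--     return terminals, non_terminals
-- ===== SOURCE B (Python) =====
-- def get_terminals_and_non_terminals(productions):
--     non_terminals = set(productions)
--
--     def go(prods):
--         if not prods:
--             return set()
--         if len(prods) == 1:
--             return set(prods[0]) - non_terminals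
--         mid = len(prods) // 2
--         return go(prods[:mid]) | go(prods[mid:])
--
--     all_prods = [prod for prods in productions.values() for prod in prods]
--     return go(all_prods), non_terminals
-- ===== Notes on version B (the rewrite author's own statement) =====
-- stated objective: alternative
-- what changed: A classifies each symbol against the non-terminal set inside a triple nested loop; B flattens the productions into one list and computes the terminal set by a binary divide-and-conquer recursion that unions per-production set-differences (set(prod) - non_terminals) over halves of the list, with no per-symbol membership classification loop.
import Mathlib
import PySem

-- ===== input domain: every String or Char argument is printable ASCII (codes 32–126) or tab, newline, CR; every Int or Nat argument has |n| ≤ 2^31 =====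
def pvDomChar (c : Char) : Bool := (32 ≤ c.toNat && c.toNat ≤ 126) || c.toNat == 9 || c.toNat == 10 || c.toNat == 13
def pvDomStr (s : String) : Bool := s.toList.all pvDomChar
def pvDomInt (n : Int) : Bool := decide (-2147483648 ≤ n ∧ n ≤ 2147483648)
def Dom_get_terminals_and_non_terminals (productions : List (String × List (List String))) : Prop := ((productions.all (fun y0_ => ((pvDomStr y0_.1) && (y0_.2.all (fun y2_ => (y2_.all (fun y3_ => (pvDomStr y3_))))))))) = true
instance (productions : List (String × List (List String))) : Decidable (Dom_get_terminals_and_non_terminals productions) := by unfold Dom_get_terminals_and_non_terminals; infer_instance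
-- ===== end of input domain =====

-- B replaces A's classify-each-symbol triple loop by a divide-and-conquer recursion:
-- it flattens the productions once and recursively unions per-production set-differences
-- over binary halves (objective: alternative, same value).

-- ===== PORT A =====
def get_terminals_and_non_terminals (productions : List (String × List (List String))) : List String × List String :=
  let d : PySem.Dict String (List (List String)) := PySem.Dict.mk productions
  let non_terminals : PySem.Set String := PySem.Set.ofList d.keys
  let terminals : PySem.Set String :=
    non_terminals.foldl (fun terminals non_terminal =>
      (d.getD non_terminal []).foldl (fun terminals production =>
        production.foldl (fun terminals symbol =>
          if !(PySem.Set.contains non_terminals symbol) then PySem.Set.add terminals symbol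
          else terminals) terminals) terminals) PySem.Set.empty
  (terminals, non_terminals)

-- ===== PORT B =====
-- B's inner recursive helper 'go' (binary divide-and-conquer over the flat production list)
def pvGoB (NT : PySem.Set String) (prods : List (List String)) : PySem.Set String :=
  if _h0 : prods = [] then PySem.Set.empty
  else if _h1 : prods.length = 1 then
    PySem.Set.diff (PySem.Set.ofList (prods.headD [])) NT
  else
    let mid := prods.length / 2
    PySem.Set.union (pvGoB NT (PySem.List.slice prods none (some (mid : Int))))
                    (pvGoB NT (PySem.List.slice prods (some (mid : Int)) none))
termination_by prods.length
decreasing_by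
  all_goals
    have hne : prods.length ≠ 0 := fun h => _h0 (List.length_eq_zero_iff.mp h)
  · rw [PySem.List.slice_to_natCast]
    simp only [List.length_take]
    omega
  · rw [PySem.List.slice_from_natCast]
    simp only [List.length_drop]
    omega

def get_terminals_and_non_terminals_alt (productions : List (String × List (List String))) : List String × List String :=
  let d : PySem.Dict String (List (List String)) := PySem.Dict.mk productions
  let non_terminals : PySem.Set String := PySem.Set.ofList d.keys
  let all_prods : List (List String) := d.values.flatten
  (pvGoB non_terminals all_prods, non_terminals)

-- ===== PRECONDITION & SPEC =====
-- The argument is a Python dict, whose keys are necessarily distinct; Pre_ restricts the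
-- association-list encoding to exactly those lists (it excludes no input the Python A accepts).
def Pre_get_terminals_and_non_terminals (productions : List (String × List (List String))) : Prop :=
  (productions.map Prod.fst).Nodup
instance (productions : List (String × List (List String))) : Decidable (Pre_get_terminals_and_non_terminals productions) := by unfold Pre_get_terminals_and_non_terminals; infer_instance

def pvWitness_get_terminals_and_non_terminals : (List (String × List (List String))) :=
  [("S", [["a", "S"], ["b", "T"]]), ("T", [["c"], []])]

def Spec_get_terminals_and_non_terminals (productions : List (String × List (List String))) (out : List String × List String) : Prop := out = get_terminals_and_non_terminals_alt productions
instance (productions : List (String × List (List String))) (out : List String × List String) : Decidable (Spec_get_terminals_and_non_terminals productions out) := by unfold Spec_get_terminals_and_non_terminals; infer_instance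

-- ===== CLAIM (what is proved, stated in full; the proofs are below) =====
def Claim_equal_get_terminals_and_non_terminals : Prop := ∀ (productions : List (String × List (List String))), Dom_get_terminals_and_non_terminals productions → Pre_get_terminals_and_non_terminals productions → Spec_get_terminals_and_non_terminals productions (get_terminals_and_non_terminals productions)

-- ===== LEMMAS AND PROOFS =====

-- update s (add t x) = add (update s t) x : inserting through an intermediate set commutes
lemma pv_update_add (s t : List String) (x : String) :
    PySem.Set.update s (PySem.Set.add t x) = PySem.Set.add (PySem.Set.update s t) x := by
  by_cases hx : x ∈ t
  · rw [PySem.Set.add_of_mem hx, PySem.Set.add_of_mem]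
    rw [PySem.Set.mem_update]; exact Or.inr hx
  · rw [PySem.Set.add_of_not_mem hx, PySem.Set.update_append]
    rfl

-- update is "associative": adding a set built from l equals adding l directly
lemma pv_update_update : ∀ (l : List String) (t s : List String),
    PySem.Set.update s (PySem.Set.update t l) = PySem.Set.update (PySem.Set.update s t) l := by
  intro l
  induction l with
  | nil => intro t s; rfl
  | cons x xs ih =>
      intro t s
      rw [PySem.Set.update_cons, ih, pv_update_add, PySem.Set.update_cons]

-- A's conditional-add fold over one production = update with the filtered production
lemma pv_f1_filter (NT : List String) : ∀ (p : List String) (s : List String),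
    p.foldl (fun t x => if !(PySem.Set.contains NT x) then PySem.Set.add t x else t) s
      = PySem.Set.update s (p.filter (fun x => !(PySem.Set.contains NT x))) := by
  intro p
  induction p with
  | nil => intro s; rfl
  | cons x xs ih =>
      intro s
      rw [List.foldl_cons, List.filter_cons, ih]
      by_cases hx : x ∈ NT
      · simp [hx]
      · simp [hx, PySem.Set.update_cons]

-- filtering commutes with the dedup performed by update/ofList
lemma pv_filter_update (g : String → Bool) : ∀ (p : List String) (s : List String),
    (PySem.Set.update s p).filter g = PySem.Set.update (s.filter g) (p.filter g) := by
  intro p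
  induction p with
  | nil => intro s; rfl
  | cons x xs ih =>
      intro s
      rw [PySem.Set.update_cons, ih]
      by_cases hx : x ∈ s
      · rw [PySem.Set.add_of_mem hx]
        by_cases hg : g x = true
        · rw [List.filter_cons_of_pos hg, PySem.Set.update_cons, PySem.Set.add_of_mem]
          exact List.mem_filter.mpr ⟨hx, hg⟩
        · rw [Bool.not_eq_true] at hg
          rw [List.filter_cons_of_neg (by simp [hg])]
      · rw [PySem.Set.add_of_not_mem hx, List.filter_append]
        have hx' : x ∉ List.filter g s := fun hmem => hx (List.mem_filter.mp hmem).1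
        by_cases hg : g x = true
        · simp only [List.filter_cons_of_pos hg, List.filter_nil,
            PySem.Set.update_cons, PySem.Set.add_of_not_mem hx']
        · rw [Bool.not_eq_true] at hg
          have hgx : ¬ g x = true := by simp [hg]
          simp only [List.filter_cons_of_neg hgx, List.filter_nil, List.append_nil]

-- B's leaf merged into an accumulator = A's conditional-add fold over that production
lemma pv_leaf (NT : List String) (p : List String) (s : List String) :
    PySem.Set.update s (PySem.Set.diff (PySem.Set.ofList p) NT)
      = p.foldl (fun t x => if !(PySem.Set.contains NT x) then PySem.Set.add t x else t) s := by
  have hdiff : PySem.Set.diff (PySem.Set.ofList p) NT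
      = PySem.Set.ofList (p.filter (fun x => !(PySem.Set.contains NT x))) := by
    show (PySem.Set.update [] p).filter _ = PySem.Set.update [] _
    rw [pv_filter_update]
    rfl
  rw [hdiff, pv_f1_filter]
  have : PySem.Set.ofList (p.filter (fun x => !(PySem.Set.contains NT x)))
      = PySem.Set.update [] (p.filter (fun x => !(PySem.Set.contains NT x))) := rfl
  rw [this, pv_update_update]
  rfl

-- the divide-and-conquer recursion, merged into an accumulator, is A's left-to-right double fold
theorem pv_go_spec (NT : List String) (prods : List (List String)) (s : List String) :
    PySem.Set.update s (pvGoB NT prods)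
      = prods.foldl (fun t p =>
          p.foldl (fun t x => if !(PySem.Set.contains NT x) then PySem.Set.add t x else t) t) s := by
  by_cases h0 : prods = []
  · subst h0; rw [pvGoB]; rfl
  · by_cases h1 : prods.length = 1
    · obtain ⟨p, hp⟩ := List.length_eq_one_iff.mp h1
      subst hp
      rw [pvGoB]
      simp only [reduceCtorEq, dite_eq_ite, List.headD_cons,
        List.foldl_cons, List.foldl_nil]
      exact pv_leaf NT p s
    · rw [pvGoB]
      simp only [dif_neg h0, dif_neg h1]
      rw [PySem.List.slice_to_natCast, PySem.List.slice_from_natCast]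
      show PySem.Set.update s
          (PySem.Set.update (pvGoB NT (prods.take (prods.length / 2)))
            (pvGoB NT (prods.drop (prods.length / 2)))) = _
      rw [pv_update_update,
        pv_go_spec NT (prods.take (prods.length / 2)) s,
        pv_go_spec NT (prods.drop (prods.length / 2)),
        ← List.foldl_append, List.take_append_drop]
termination_by prods.length
decreasing_by
  all_goals
    have hne : prods.length ≠ 0 := fun h => h0 (List.length_eq_zero_iff.mp h)
  · simp only [List.length_take]; omega
  · simp only [List.length_drop]; omega

-- pvGoB returns a duplicate-free list, so merging it into the empty set is the identity
theorem pv_go_nodup (NT : PySem.Set String) (prods : List (List String)) :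
    (pvGoB NT prods).Nodup := by
  rw [pvGoB]
  by_cases h0 : prods = []
  · simp only [dif_pos h0]; exact List.nodup_nil
  · by_cases h1 : prods.length = 1
    · simp only [dif_neg h0, dif_pos h1]
      exact PySem.Set.nodup_diff _ _ (PySem.Set.nodup_ofList _)
    · simp only [dif_neg h0, dif_neg h1]
      exact PySem.Set.nodup_union _ _ (pv_go_nodup NT _)
termination_by prods.length
decreasing_by
  · have hne : prods.length ≠ 0 := fun h => h0 (List.length_eq_zero_iff.mp h)
    rw [PySem.List.slice_to_natCast]; simp only [List.length_take]; omega

lemma pv_getD_mk_cons (k : String) (v : List (List String)) (rest : List (String × List (List String))) (k' : String) :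
    (PySem.Dict.mk ((k, v) :: rest)).getD k' [] =
      if k = k' then v else (PySem.Dict.mk rest).getD k' [] := by
  by_cases h : k = k'
  · simp [PySem.Dict.getD, PySem.Dict.get?, List.find?, h]
  · have hb : (k == k') = false := by simp [h]
    simp [PySem.Dict.getD, PySem.Dict.get?, List.find?, hb, h]

-- with distinct keys, looking up each key in order yields the values in order
lemma pv_map_getD : ∀ (productions : List (String × List (List String))),
    (productions.map Prod.fst).Nodup →
    (productions.map Prod.fst).map (fun k => (PySem.Dict.mk productions).getD k []) =
      productions.map Prod.snd := by
  intro productions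
  induction productions with
  | nil => intro _; rfl
  | cons p rest ih =>
      intro h
      obtain ⟨k, v⟩ := p
      simp only [List.map_cons, List.nodup_cons] at h ⊢
      congr 1
      · rw [pv_getD_mk_cons, if_pos rfl]
      · rw [List.map_congr_left (g := fun k' => (PySem.Dict.mk rest).getD k' []), ih h.2]
        intro k' hk'
        rw [pv_getD_mk_cons, if_neg]
        intro he; exact h.1 (he ▸ hk')

-- ===== VERDICT (by name: the statement is the Claim_ definition above) =====
theorem get_terminals_and_non_terminals_spec : Claim_equal_get_terminals_and_non_terminals := by
  intro productions _ hpre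
  unfold Spec_get_terminals_and_non_terminals
  unfold get_terminals_and_non_terminals get_terminals_and_non_terminals_alt
  have hnt : PySem.Set.ofList (PySem.Dict.mk productions).keys = productions.map Prod.fst := by
    rw [PySem.Dict.keys_mk]; exact PySem.Set.ofList_eq_self_of_nodup _ hpre
  simp only [hnt, PySem.Dict.values_mk]
  rw [Prod.mk.injEq]
  refine ⟨?_, rfl⟩
  rw [← List.foldl_map (f := fun k => (PySem.Dict.mk productions).getD k [])
        (g := fun t prods =>
          prods.foldl (fun t production =>
            production.foldl (fun t x =>
              if !(PySem.Set.contains (List.map Prod.fst productions) x) then PySem.Set.add t x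
              else t) t) t),
      pv_map_getD productions hpre]
  rw [← List.foldl_flatten,
    ← pv_go_spec (List.map Prod.fst productions) (productions.map Prod.snd).flatten
        PySem.Set.empty]
  show PySem.Set.update [] _ = _
  rw [PySem.Set.update_nil_left, PySem.Set.ofList_eq_self_of_nodup _ (pv_go_nodup _ _)]
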